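-- pv_equiv track=rewrite | github.com/apache/beam | sdks/python/apache_beam/ml/transforms/base.py | _dict_input_fn
-- ===== SOURCE A (Python) =====
-- from collections.abc import Sequence
-- from typing import Any
-- from typing import Dict
-- from typing import List
--
-- def _dict_input_fn(columns: Sequence[str],
--                    batch: Sequence[Dict[str, Any]]) -> List[str]:
--   """Extract text from specified columns in batch."""
--   if not batch or not isinstance(batch[0], dict):
--     raise TypeError(
--         'Expected data to be dicts, got '
--         f'{type(batch[0])} instead.')
--
--   result = []
--   expected_keys = set(batch[0].keys())
--   expected_columns = set(columns)
--   # Process one batch item at a time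
--   for item in batch:
--     item_keys = item.keys()
--     if set(item_keys) != expected_keys:
--       extra_keys = item_keys - expected_keys
--       missing_keys = expected_keys - item_keys
--       raise RuntimeError(
--           f'All dicts in batch must have the same keys. '
--           f'extra keys: {extra_keys}, '
--           f'missing keys: {missing_keys}')
--     missing_columns = expected_columns - item_keys
--     if (missing_columns):
--       raise RuntimeError(
--           f'Data does not contain the following columns '
--           f': {missing_columns}.')
--
--     # Get all columns for this item
--     for col in columns:
--       result.append(item[col])
--   return result
-- ===== SOURCE B (Python) =====
-- def _dict_input_fn(columns, batch):
--   """Extract text from specified columns in batch."""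
--   if not batch or not isinstance(batch[0], dict):
--     raise TypeError(
--         'Expected data to be dicts, got '
--         f'{type(batch[0])} instead.')
--
--   expected_keys = frozenset(batch[0])
--   # Validation: find the first item whose key set deviates, in one scan.
--   bad = next((item for item in batch if frozenset(item) != expected_keys), None)
--   if bad is not None:
--     raise RuntimeError(
--         f'All dicts in batch must have the same keys. '
--         f'extra keys: {frozenset(bad) - expected_keys}, '
--         f'missing keys: {expected_keys - frozenset(bad)}')
--   # All items share expected_keys, so one missing-columns check suffices.
--   missing_columns = frozenset(columns) - expected_keys
--   if missing_columns:
--     raise RuntimeError(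
--         f'Data does not contain the following columns '
--         f': {missing_columns}.')
--
--   # Extraction: gather column-major, then transpose back to item-major.
--   per_column = [[item[col] for item in batch] for col in columns]
--   return [value for row in zip(*per_column) for value in row]
-- ===== Notes on version B (the rewrite author's own statement) =====
-- stated objective: alternative
-- what changed: Validation becomes one find-first-deviating-key-set scan plus a single missing-columns check against the shared key set, and extraction gathers values column-major and then zip-transposes back to item-major, instead of A's interleaved per-item validate-and-append loop.
import Mathlib
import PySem

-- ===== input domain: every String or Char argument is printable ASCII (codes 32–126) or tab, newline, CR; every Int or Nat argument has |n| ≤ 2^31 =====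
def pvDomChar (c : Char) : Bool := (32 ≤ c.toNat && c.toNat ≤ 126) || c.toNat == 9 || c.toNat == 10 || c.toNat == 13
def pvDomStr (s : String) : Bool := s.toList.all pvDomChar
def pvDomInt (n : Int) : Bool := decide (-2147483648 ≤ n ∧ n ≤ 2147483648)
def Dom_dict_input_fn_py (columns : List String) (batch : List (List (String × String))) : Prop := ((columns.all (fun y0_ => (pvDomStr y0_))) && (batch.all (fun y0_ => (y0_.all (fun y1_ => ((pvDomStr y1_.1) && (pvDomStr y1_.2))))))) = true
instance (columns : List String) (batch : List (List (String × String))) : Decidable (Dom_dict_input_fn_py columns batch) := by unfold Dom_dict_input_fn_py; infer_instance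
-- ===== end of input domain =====

-- B validates via one find-first-bad-key-set scan plus a single missing-columns check, and
-- extracts column-major then zip-transposes back to item-major (objective: alternative).


-- ===== PORT A =====
-- item[col]: first-match dict lookup; Python's KeyError (none) is excluded by Pre_, so getD "" is never taken inside Pre_.
def pvGetCol (item : List (String × String)) (col : String) : String :=
  ((PySem.Dict.mk item).get? col).getD ""

-- the 'for item in batch' loop of A; the two 'raise RuntimeError' branches return the
-- result built so far (those inputs are excluded by Pre_).
def pvLoopA (columns : List String) (ek ec : PySem.Set String)
    : List (List (String × String)) → List String → List String
  | [], result => result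
  | item :: rest, result =>
    let itemKeys : PySem.Set String := PySem.Set.ofList (item.map Prod.fst)
    if PySem.Set.equal itemKeys ek ≠ true then result          -- raise RuntimeError (same keys)
    else if PySem.Set.diff ec itemKeys ≠ [] then result        -- raise RuntimeError (missing columns)
    else pvLoopA columns ek ec rest
      (columns.foldl (fun r col => r ++ [pvGetCol item col]) result)  -- inner 'for col in columns'

def dict_input_fn_py (columns : List String) (batch : List (List (String × String))) : List String :=
  match batch with
  | [] => []  -- Python raises TypeError here (excluded by Pre_)
  | first :: _ =>
    pvLoopA columns (PySem.Set.ofList (first.map Prod.fst)) (PySem.Set.ofList columns) batch []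

-- ===== PORT B =====
-- zip(*lists): rows of heads while every list is nonempty (truncates at the shortest list)
def pvZipStar (ls : List (List String)) : List (List String) :=
  if h : ls ≠ [] ∧ ls.all (fun l => !l.isEmpty) then
    (ls.map List.headI) :: pvZipStar (ls.map List.tail)
  else []
termination_by ls.headI.length
decreasing_by
  obtain ⟨hne, hall⟩ := h
  cases ls with
  | nil => exact absurd rfl hne
  | cons a t =>
    simp only [List.all_cons, Bool.and_eq_true, Bool.not_eq_eq_eq_not, Bool.not_true,
      List.isEmpty_eq_false_iff] at hall
    cases a with
    | nil => exact absurd rfl hall.1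
    | cons x xs => simp [List.headI]

def dict_input_fn_py_alt (columns : List String) (batch : List (List (String × String))) : List String :=
  match batch with
  | [] => []  -- Python raises TypeError here (excluded by Pre_)
  | first :: _ =>
    let ek := PySem.Set.ofList (first.map Prod.fst)
    -- 'bad = next((item for item in batch if frozenset(item) != expected_keys), None)'
    match batch.find? (fun item =>
        !(PySem.Set.equal (PySem.Set.ofList (item.map Prod.fst)) ek)) with
    | some _ => []  -- raise RuntimeError (same keys) (excluded by Pre_)
    | none =>
      if PySem.Set.diff (PySem.Set.ofList columns) ek ≠ [] then []  -- raise RuntimeError (excluded by Pre_)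
      else
        -- per_column = [[item[col] for item in batch] for col in columns]; flatten zip(*per_column)
        (pvZipStar (columns.map (fun col => batch.map (fun item => pvGetCol item col)))).flatten

-- ===== PRECONDITION & SPEC =====
-- Pre_ excludes exactly the inputs where A raises: the empty batch (TypeError), an item whose
-- key set differs from the first item's, and a column absent from an item (RuntimeError).
def Pre_dict_input_fn_py (columns : List String) (batch : List (List (String × String))) : Prop :=
  batch ≠ [] ∧ ∀ item ∈ batch,
    (∀ k ∈ item.map Prod.fst, k ∈ (batch.headI).map Prod.fst) ∧
    (∀ k ∈ (batch.headI).map Prod.fst, k ∈ item.map Prod.fst) ∧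
    (∀ c ∈ columns, c ∈ item.map Prod.fst)
instance (columns : List String) (batch : List (List (String × String))) : Decidable (Pre_dict_input_fn_py columns batch) := by unfold Pre_dict_input_fn_py; infer_instance

def pvWitness_dict_input_fn_py : List String × (List (List (String × String))) :=
  (["a", "b"], [[("a", "1"), ("b", "2"), ("c", "x")], [("b", "4"), ("a", "3"), ("c", "y")]])

def Spec_dict_input_fn_py (columns : List String) (batch : List (List (String × String))) (out : List String) : Prop := out = dict_input_fn_py_alt columns batch
instance (columns : List String) (batch : List (List (String × String))) (out : List String) : Decidable (Spec_dict_input_fn_py columns batch out) := by unfold Spec_dict_input_fn_py; infer_instance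

-- ===== CLAIM (what is proved, stated in full; the proofs are below) =====
def Claim_equal_dict_input_fn_py : Prop := ∀ (columns : List String) (batch : List (List (String × String))), Dom_dict_input_fn_py columns batch → Pre_dict_input_fn_py columns batch → Spec_dict_input_fn_py columns batch (dict_input_fn_py columns batch)

-- ===== LEMMAS AND PROOFS =====

-- every item admitted by Pre_ has the expected key set
lemma pvKeysEq_of_pre (first item : List (String × String))
    (h1 : ∀ k ∈ item.map Prod.fst, k ∈ first.map Prod.fst)
    (h2 : ∀ k ∈ first.map Prod.fst, k ∈ item.map Prod.fst) :
    PySem.Set.equal (PySem.Set.ofList (item.map Prod.fst))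
      (PySem.Set.ofList (first.map Prod.fst)) = true := by
  rw [PySem.Set.equal_iff]
  intro x
  simp only [PySem.Set.mem_ofList]
  exact ⟨h1 x, h2 x⟩

-- columns contained in an item's keys ⇒ the set difference is empty
lemma pvDiff_nil_of_sub (columns : List String) (keys : List String)
    (h : ∀ c ∈ columns, c ∈ keys) :
    PySem.Set.diff (PySem.Set.ofList columns) (PySem.Set.ofList keys) = [] := by
  rw [List.eq_nil_iff_forall_not_mem]
  intro x hx
  rw [PySem.Set.mem_diff, PySem.Set.mem_ofList, PySem.Set.mem_ofList] at hx
  exact hx.2 (h x hx.1)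

-- A's loop, on a batch whose every item has the expected keys and all columns,
-- appends the flatMap of extractions
lemma pvLoopA_of_valid (columns : List String) (ek ec : PySem.Set String)
    (l : List (List (String × String))) (acc : List String)
    (hval : ∀ item ∈ l,
      PySem.Set.equal (PySem.Set.ofList (item.map Prod.fst)) ek = true ∧
      PySem.Set.diff ec (PySem.Set.ofList (item.map Prod.fst)) = []) :
    pvLoopA columns ek ec l acc
      = acc ++ l.flatMap (fun item => columns.map (fun col => pvGetCol item col)) := by
  induction l generalizing acc with
  | nil => simp [pvLoopA]
  | cons item rest ih =>
    have hv := hval item (List.mem_cons_self ..)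
    unfold pvLoopA
    rw [if_neg (by simp [hv.1]), if_neg (by simp [hv.2])]
    rw [PySem.List.foldl_append_singleton_eq_map,
        ih _ (fun i hi => hval i (List.mem_cons_of_mem _ hi))]
    simp [List.flatMap_cons]

-- zip-transpose of a column-major table is the item-major table (nonempty column list)
lemma pvZipStar_map (f : List (String × String) → String → String)
    (cols : List String) (hc : cols ≠ []) (l : List (List (String × String))) :
    pvZipStar (cols.map (fun c => l.map (fun x => f x c)))
      = l.map (fun x => cols.map (fun c => f x c)) := by
  induction l with
  | nil =>
    rw [pvZipStar]
    rw [dif_neg]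
    · rfl
    · rintro ⟨-, hall⟩
      cases cols with
      | nil => exact absurd rfl hc
      | cons c cs => simp at hall
  | cons x rest ih =>
    rw [pvZipStar]
    rw [dif_pos]
    · have h1 : (cols.map (fun c => (x :: rest).map (fun y => f y c))).map List.headI
          = cols.map (fun c => f x c) := by
        simp [List.map_map, Function.comp]
      have h2 : (cols.map (fun c => (x :: rest).map (fun y => f y c))).map List.tail
          = cols.map (fun c => rest.map (fun y => f y c)) := by
        simp [List.map_map, Function.comp]
      rw [h1, h2, ih]
      rfl
    · constructor
      · simpa using hc
      · simp

-- ===== VERDICT (by name: the statement is the Claim_ definition above) =====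
theorem dict_input_fn_py_spec : Claim_equal_dict_input_fn_py := by
  intro columns batch _ hpre
  obtain ⟨hne, hitems⟩ := hpre
  unfold Spec_dict_input_fn_py
  match batch, hne with
  | first :: rest, _ =>
    have hval : ∀ item ∈ first :: rest,
        PySem.Set.equal (PySem.Set.ofList (item.map Prod.fst))
          (PySem.Set.ofList (first.map Prod.fst)) = true ∧
        PySem.Set.diff (PySem.Set.ofList columns)
          (PySem.Set.ofList (item.map Prod.fst)) = [] := by
      intro item hi
      obtain ⟨h1, h2, h3⟩ := hitems item hi
      exact ⟨pvKeysEq_of_pre first item h1 h2, pvDiff_nil_of_sub columns _ h3⟩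
    have hfind : (first :: rest).find? (fun item =>
        !(PySem.Set.equal (PySem.Set.ofList (item.map Prod.fst))
          (PySem.Set.ofList (first.map Prod.fst)))) = none := by
      rw [List.find?_eq_none]
      intro item hi
      simp [(hval item hi).1]
    have hfirst := hval first (List.mem_cons_self ..)
    have hdiff : PySem.Set.diff (PySem.Set.ofList columns)
        (PySem.Set.ofList (first.map Prod.fst)) = [] := hfirst.2
    simp only [dict_input_fn_py, dict_input_fn_py_alt, hfind, hdiff, ne_eq,
      not_true_eq_false, if_false]
    rw [pvLoopA_of_valid _ _ _ _ _ hval, List.nil_append]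
    cases hc : columns with
    | nil => simp [pvZipStar]
    | cons c cs =>
      rw [← hc, pvZipStar_map pvGetCol columns (by simp [hc]) (first :: rest)]
      simp [List.flatMap]
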